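-- pv_equiv track=rewrite | github.com/kuznetsovvj/education | algorithms/codeforces/1915e.py | check
-- ===== SOURCE A (Python) =====
-- def check(seq):
--     prev = [0]
--     for i in range(len(seq)):
--         if i % 2 == 1:
--             j = prev[-1] - seq[i]
--         else:
--             j = prev[-1] + seq[i]
--         prev.append(j)
--         if j == 0:
--             return "YES"
--     prev.sort()
--     for i in range(1, len(prev)):
--         if prev[i] == prev[i-1]:
--             return "YES"
--     return "NO"
-- ===== SOURCE B (Python) =====
-- def check(seq):
--     # answer is "YES" iff some alternating prefix sum is 0 or repeats:
--     # one pass over seq, keeping all prefix sums seen so far (0 included) in a set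
--     seen = {0}
--     s = 0
--     sign = 1
--     for x in seq:
--         s += sign * x
--         if s in seen:
--             return "YES"
--         seen.add(s)
--         sign = -sign
--     return "NO"
-- ===== Notes on version B (the rewrite author's own statement) =====
-- stated objective: faster
-- what changed: Instead of materialising the whole prefix-sum list and sorting it to find duplicates, B makes a single pass keeping the prefix sums seen so far in a hash set (seeded with 0, so a zero prefix is just a duplicate) and returns YES on the first repeat.
import Mathlib
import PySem

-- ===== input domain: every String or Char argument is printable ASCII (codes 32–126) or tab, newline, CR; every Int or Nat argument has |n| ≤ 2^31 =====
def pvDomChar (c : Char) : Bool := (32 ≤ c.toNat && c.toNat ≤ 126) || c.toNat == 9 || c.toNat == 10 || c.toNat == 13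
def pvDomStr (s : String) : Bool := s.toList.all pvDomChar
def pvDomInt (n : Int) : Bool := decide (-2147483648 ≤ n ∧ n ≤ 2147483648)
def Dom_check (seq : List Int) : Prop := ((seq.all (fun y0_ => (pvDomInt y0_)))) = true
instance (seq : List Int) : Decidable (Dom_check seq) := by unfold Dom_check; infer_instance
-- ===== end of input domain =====

-- B replaces A's build-then-sort duplicate search by a single pass over a set of seen
-- prefix sums (objective: faster, O(n) vs O(n log n)). A mutates nothing observable.

-- ===== PORT A =====
-- the second loop of A: 'for i in range(1, len(prev)): if prev[i] == prev[i-1]: return "YES"'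
-- (indices are always in range, so pyGetD's default is never used)
def checkDupScan (p : List Int) : List Int → String
  | [] => "NO"
  | i :: rest =>
      if PySem.List.pyGetD p i 0 == PySem.List.pyGetD p (i - 1) 0 then "YES"
      else checkDupScan p rest

-- the first loop of A: builds prev, early "YES" on j == 0 (prev[-1] and seq[i] are
-- always in range, so pyGetD's default is never used)
def checkLoop (seq : List Int) (prev : List Int) : List Int → Sum String (List Int)
  | [] => .inr prev
  | i :: rest =>
      let j := if PySem.Int.mod i 2 == 1
               then PySem.List.pyGetD prev (-1) 0 - PySem.List.pyGetD seq i 0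
               else PySem.List.pyGetD prev (-1) 0 + PySem.List.pyGetD seq i 0
      let prev' := prev ++ [j]
      if j == 0 then .inl "YES" else checkLoop seq prev' rest

def check (seq : List Int) : String :=
  match checkLoop seq [0] (PySem.List.pyRange 0 (seq.length : Int) 1) with
  | .inl s => s
  | .inr prev =>
      let p := PySem.List.sorted prev (fun x => x) false
      checkDupScan p (PySem.List.pyRange 1 (p.length : Int) 1)

-- ===== PORT B =====
def checkAltLoop : List Int → PySem.Set Int → Int → Int → String
  | [], _, _, _ => "NO"
  | x :: rest, seen, s, sign =>
      let s' := s + sign * x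
      if PySem.Set.contains seen s' then "YES"
      else checkAltLoop rest (PySem.Set.add seen s') s' (-sign)

def check_alt (seq : List Int) : String :=
  checkAltLoop seq (PySem.Set.ofList [0]) 0 1

-- ===== PRECONDITION & SPEC =====
def Spec_check (seq : List Int) (out : String) : Prop := out = check_alt seq
instance (seq : List Int) (out : String) : Decidable (Spec_check seq out) := by unfold Spec_check; infer_instance

-- ===== CLAIM (what is proved, stated in full; the proofs are below) =====
def Claim_equal_check : Prop := ∀ (seq : List Int), Dom_check seq → Spec_check seq (check seq)

-- ===== LEMMAS AND PROOFS =====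

-- proof-side reference: the alternating prefix sums continuing from sum s with sign `sign`
def pfx : Int → Int → List Int → List Int
  | _, _, [] => []
  | s, sign, x :: xs => (s + sign * x) :: pfx (s + sign * x) (-sign) xs

-- proof-side: some adjacent pair equal
def adj : List Int → Bool
  | a :: b :: t => a == b || adj (b :: t)
  | _ => false

theorem checkAltLoop_char (xs : List Int) : ∀ (seen : PySem.Set Int) (s sign : Int),
    seen.Nodup →
    checkAltLoop xs seen s sign = if (seen ++ pfx s sign xs).Nodup then "NO" else "YES" := by
  induction xs with
  | nil => intro seen s sign h; simp [checkAltLoop, pfx, h]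
  | cons x rest ih =>
    intro seen s sign h
    rw [checkAltLoop]
    by_cases hm : (s + sign * x) ∈ seen
    · have hnd : ¬ (seen ++ pfx s sign (x :: rest)).Nodup := by
        rw [pfx]; intro hn
        rcases List.nodup_append.mp hn with ⟨_, _, hd⟩
        exact hd _ hm _ (by simp) rfl
      simp [hm, hnd]
    · rw [PySem.Set.add_of_not_mem hm]
      have hnd2 : (seen ++ [s + sign * x]).Nodup := by
        refine List.Nodup.append h (by simp) ?_
        intro a ha hb
        simp at hb; subst hb; exact hm ha
      rw [ih _ _ _ hnd2]
      have hl : (seen ++ [s + sign * x]) ++ pfx (s + sign * x) (-sign) rest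
          = seen ++ pfx s sign (x :: rest) := by
        rw [pfx]; simp
      rw [hl]
      simp [hm, pfx]

theorem checkLoop_char (seq : List Int) : ∀ (i : Nat) (prev : List Int) (hne : prev ≠ []),
    checkLoop seq prev (PySem.List.pyRange (i : Int) (seq.length : Int) 1) =
      (if 0 ∈ pfx (prev.getLast hne) (if i % 2 = 1 then -1 else 1) (seq.drop i) then .inl "YES"
       else .inr (prev ++ pfx (prev.getLast hne) (if i % 2 = 1 then -1 else 1) (seq.drop i))) := by
  intro i
  induction hn : seq.length - i using Nat.strong_induction_on generalizing i with
  | _ n ih =>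
    intro prev hne
    by_cases hlt : i < seq.length
    · rw [PySem.List.pyRange_one_cons (by exact_mod_cast hlt)]
      rw [checkLoop]
      have hmod : PySem.Int.mod (i : Int) 2 = ((i % 2 : Nat) : Int) := PySem.Int.mod_natCast i 2
      have hgs : PySem.List.pyGetD seq (i : Int) 0 = seq[i] := by
        rw [PySem.List.pyGetD_natCast]; exact List.getD_eq_getElem seq 0 hlt
      have hgp : PySem.List.pyGetD prev (-1) 0 = prev.getLast hne :=
        PySem.List.pyGetD_neg_one prev 0 hne
      have hdrop : seq.drop i = seq[i] :: seq.drop (i + 1) := List.drop_eq_getElem_cons hlt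
      set sg : Int := if i % 2 = 1 then -1 else 1 with hsg
      have hj : (if PySem.Int.mod (i : Int) 2 == 1
               then PySem.List.pyGetD prev (-1) 0 - PySem.List.pyGetD seq (i : Int) 0
               else PySem.List.pyGetD prev (-1) 0 + PySem.List.pyGetD seq (i : Int) 0)
             = prev.getLast hne + sg * seq[i] := by
        rw [hmod, hgs, hgp, hsg]
        rcases Nat.mod_two_eq_zero_or_one i with hp | hp <;> simp [hp] <;> ring
      rw [hj]
      have hpfx : pfx (prev.getLast hne) sg (seq.drop i)
          = (prev.getLast hne + sg * seq[i]) ::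
              pfx (prev.getLast hne + sg * seq[i]) (-sg) (seq.drop (i + 1)) := by
        rw [hdrop]; rfl
      by_cases hz : prev.getLast hne + sg * seq[i] = 0
      · simp [hz, hpfx]
      · have hbe : (prev.getLast hne + sg * seq[i] == 0) = false := by
          simp [hz]
        simp only [hbe, Bool.false_eq_true, if_false]
        have hcast : (i : Int) + 1 = ((i + 1 : Nat) : Int) := by push_cast; ring
        rw [hcast]
        rw [ih (seq.length - (i + 1)) (by omega) (i + 1) rfl _ (by simp)]
        simp only [List.getLast_append_singleton]
        have hsg' : (if (i + 1) % 2 = 1 then (-1 : Int) else 1) = -sg := by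
          rcases Nat.mod_two_eq_zero_or_one i with hp | hp
          · simp [hsg, Nat.add_mod, hp]
          · simp [hsg, Nat.add_mod, hp]
        rw [hsg', hpfx]
        have hz' : ¬((0 : Int) = prev.getLast hne + sg * seq[i]) := fun he => hz he.symm
        simp [hz']
    · have hnil : PySem.List.pyRange (i : Int) (seq.length : Int) 1 = [] :=
        PySem.List.pyRange_one_eq_nil (by exact_mod_cast Nat.le_of_not_lt hlt)
      have hd : seq.drop i = [] := List.drop_eq_nil_of_le (Nat.le_of_not_lt hlt)
      rw [hnil, hd]
      simp [checkLoop, pfx]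

theorem checkDupScan_char (p : List Int) : ∀ (i : Nat), 1 ≤ i →
    checkDupScan p (PySem.List.pyRange (i : Int) (p.length : Int) 1) =
      if adj (p.drop (i - 1)) then "YES" else "NO" := by
  intro i
  induction hn : p.length - i using Nat.strong_induction_on generalizing i with
  | _ n ih =>
    intro h1
    by_cases hlt : i < p.length
    · rw [PySem.List.pyRange_one_cons (by exact_mod_cast hlt)]
      rw [checkDupScan]
      have hgi : PySem.List.pyGetD p (i : Int) 0 = p[i] := by
        rw [PySem.List.pyGetD_natCast]; exact List.getD_eq_getElem p 0 hlt
      have hcast : (i : Int) - 1 = ((i - 1 : Nat) : Int) := by omega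
      have hgi1 : PySem.List.pyGetD p ((i : Int) - 1) 0 = p[i - 1] := by
        rw [hcast, PySem.List.pyGetD_natCast]
        exact List.getD_eq_getElem p 0 (by omega)
      have hdrop : p.drop (i - 1) = p[i - 1] :: p.drop i := by
        have h := List.drop_eq_getElem_cons (l := p) (show i - 1 < p.length by omega)
        rwa [Nat.sub_add_cancel h1] at h
      have hdrop2 : p.drop i = p[i] :: p.drop (i + 1) := List.drop_eq_getElem_cons hlt
      rw [hgi, hgi1]
      by_cases heq : p[i] = p[i - 1]
      · simp [heq, hdrop, hdrop2, adj]
      · have hbe : (p[i] == p[i - 1]) = false := by simp [heq]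
        simp only [hbe, Bool.false_eq_true, if_false]
        have hcast2 : (i : Int) + 1 = ((i + 1 : Nat) : Int) := by push_cast; ring
        rw [hcast2, ih (p.length - (i + 1)) (by omega) (i + 1) rfl (by omega)]
        have : (i + 1) - 1 = i := by omega
        rw [this, hdrop, hdrop2, adj]
        have : (p[i - 1] == p[i]) = false := by
          rw [beq_eq_false_iff_ne]; exact fun h => heq h.symm
        simp [this]
    · have hnil : PySem.List.pyRange (i : Int) (p.length : Int) 1 = [] :=
        PySem.List.pyRange_one_eq_nil (by exact_mod_cast Nat.le_of_not_lt hlt)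
      rw [hnil]
      have hlen : (p.drop (i - 1)).length ≤ 1 := by
        rw [List.length_drop]; omega
      match hm : p.drop (i - 1) with
      | [] => simp [checkDupScan, adj]
      | [a] => simp [checkDupScan, adj]
      | a :: b :: t => rw [hm] at hlen; simp at hlen

-- on a ≤-sorted list, an adjacent duplicate is exactly a duplicate
theorem adj_iff_not_nodup : ∀ (p : List Int), p.Pairwise (· ≤ ·) → (adj p = true ↔ ¬ p.Nodup)
  | [] => by simp [adj]
  | [a] => by simp [adj]
  | a :: b :: t => by
    intro hp
    have hab : a ≤ b := (List.pairwise_cons.mp hp).1 b (by simp)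
    have ht : (b :: t).Pairwise (· ≤ ·) := (List.pairwise_cons.mp hp).2
    have ih := adj_iff_not_nodup (b :: t) ht
    rw [adj, Bool.or_eq_true, beq_iff_eq, ih]
    constructor
    · rintro (h | h)
      · subst h; simp [List.nodup_cons]
      · intro hn; exact h (List.nodup_cons.mp hn).2
    · intro hn
      by_cases hd : (b :: t).Nodup
      · left
        by_contra hne
        apply hn
        refine List.nodup_cons.mpr ⟨?_, hd⟩
        intro hmem
        rcases List.mem_cons.mp hmem with h | h
        · exact hne h
        · have hb : b ≤ a := (List.pairwise_cons.mp ht).1 a h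
          exact hne (le_antisymm hab hb)
      · right; exact hd

-- A's value characterised: "YES" exactly when the prefix-sum list (0 included) repeats
theorem check_char (seq : List Int) :
    check seq = if (0 :: pfx 0 1 seq).Nodup then "NO" else "YES" := by
  rw [check]
  have := checkLoop_char seq 0 [0] (by simp)
  simp only [Nat.cast_zero, List.getLast_singleton, List.drop_zero] at this
  norm_num at this
  rw [this]
  by_cases hz : (0 : Int) ∈ pfx 0 1 seq
  · have : ¬ (0 :: pfx 0 1 seq).Nodup := by
      simp [List.nodup_cons]; intro h; exact absurd hz h
    simp [hz, this]
  · rw [if_neg hz]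
    have hperm : (PySem.List.sorted ((0 : Int) :: pfx 0 1 seq) (fun x => x) false).Perm
        ((0 : Int) :: pfx 0 1 seq) := PySem.List.sorted_perm _ _ _
    have hsorted : (PySem.List.sorted ((0 : Int) :: pfx 0 1 seq) (fun x => x) false).Pairwise
        (· ≤ ·) := by
      have := PySem.List.sorted_pairwise ((0 : Int) :: pfx 0 1 seq) (fun x => x)
      simpa using this
    have hd := checkDupScan_char (PySem.List.sorted ((0 : Int) :: pfx 0 1 seq) (fun x => x) false) 1 le_rfl
    simp only [Nat.cast_one, Nat.sub_self, List.drop_zero] at hd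
    change checkDupScan (PySem.List.sorted ((0 : Int) :: pfx 0 1 seq) (fun x => x) false)
        (PySem.List.pyRange 1 ((PySem.List.sorted ((0 : Int) :: pfx 0 1 seq) (fun x => x) false).length : Int) 1) = _
    rw [hd]
    by_cases hnd : ((0 : Int) :: pfx 0 1 seq).Nodup
    · have : adj (PySem.List.sorted ((0 : Int) :: pfx 0 1 seq) (fun x => x) false) = false := by
        by_contra hc
        have hadj : adj (PySem.List.sorted ((0 : Int) :: pfx 0 1 seq) (fun x => x) false) = true := by
          revert hc
          cases adj (PySem.List.sorted ((0 : Int) :: pfx 0 1 seq) (fun x => x) false) <;> simp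
        exact (adj_iff_not_nodup (PySem.List.sorted ((0 : Int) :: pfx 0 1 seq) (fun x => x) false)
          hsorted).mp hadj (hperm.symm.nodup hnd)
      simp [this, hnd]
    · have : adj (PySem.List.sorted ((0 : Int) :: pfx 0 1 seq) (fun x => x) false) = true :=
        (adj_iff_not_nodup (PySem.List.sorted ((0 : Int) :: pfx 0 1 seq) (fun x => x) false)
          hsorted).mpr (fun h => hnd (List.Perm.nodup hperm h))
      simp [this, hnd]

theorem check_alt_char (seq : List Int) :
    check_alt seq = if (0 :: pfx 0 1 seq).Nodup then "NO" else "YES" := by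
  rw [check_alt]
  have hof : PySem.Set.ofList [(0 : Int)] = [0] := rfl
  rw [hof, checkAltLoop_char seq [0] 0 1 (by simp)]
  simp [List.cons_append]

-- ===== VERDICT (by name: the statement is the Claim_ definition above) =====
theorem check_spec : Claim_equal_check := by
  intro seq _
  unfold Spec_check
  rw [check_char, check_alt_char]
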